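-- pv_equiv track=rewrite | github.com/AkashKodihithlu/PlagiarismDetector | backend/dataset/dfs_py_11.py | solve
-- ===== SOURCE A (Python) =====
-- def solve(graph, start):
--     visited = set()
--     # Update state
--     def dfs(v):
--
--         if v not in visited:
--             visited.add(v)
--             for neighbor in graph.get(v, []):
--                 dfs(neighbor)
--     dfs(start)
--     return visited
-- ===== SOURCE B (Python) =====
-- def solve(graph, start):
--     visited = set()
--     stack = [start]
--     while stack:
--         v = stack.pop(0)
--         if v not in visited:
--             visited.add(v)
--             stack = graph.get(v, []) + stack
--     return visited
-- ===== Notes on version B (the rewrite author's own statement) =====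
-- stated objective: alternative
-- what changed: Replaced the recursive closure-based DFS by an explicit iterative worklist loop (pop the front node, mark it, prepend its neighbors), removing recursion entirely.
import Mathlib
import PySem

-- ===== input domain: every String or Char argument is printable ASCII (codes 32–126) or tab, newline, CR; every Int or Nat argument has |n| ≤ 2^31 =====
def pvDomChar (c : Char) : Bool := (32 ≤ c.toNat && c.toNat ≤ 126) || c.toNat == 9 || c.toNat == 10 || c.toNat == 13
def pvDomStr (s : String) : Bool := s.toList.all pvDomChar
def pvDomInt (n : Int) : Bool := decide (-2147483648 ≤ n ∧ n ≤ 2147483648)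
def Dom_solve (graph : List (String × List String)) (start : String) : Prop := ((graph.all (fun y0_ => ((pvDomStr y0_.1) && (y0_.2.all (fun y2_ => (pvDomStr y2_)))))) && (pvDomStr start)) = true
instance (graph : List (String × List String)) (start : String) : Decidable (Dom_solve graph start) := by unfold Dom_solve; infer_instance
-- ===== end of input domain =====

-- B replaces A's recursive DFS closure by an explicit iterative worklist loop; same visited set, same insertion order.


-- ===== PORT A =====
-- graph.get(v, []) (first-match lookup on the association list, per the dict convention)
def pvLookup (graph : List (String × List String)) (v : String) : List String :=
  PySem.Dict.getD (PySem.Dict.mk graph) v []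

-- all nodes that can ever enter `visited` besides the start: keys and neighbors
def pvUniverse (graph : List (String × List String)) : List String :=
  graph.map Prod.fst ++ graph.flatMap Prod.snd

-- number of universe entries not yet visited (termination measure for both ports)
def pvUnvis (graph : List (String × List String)) (visited : PySem.Set String) : Nat :=
  ((pvUniverse graph).filter (fun x => !PySem.Set.contains visited x)).length

-- a node outside the universe is not a key, so it has no neighbors
theorem pvLookup_not_mem (graph : List (String × List String)) (v : String)
    (h : v ∉ pvUniverse graph) : pvLookup graph v = [] := by
  induction graph with
  | nil => rfl
  | cons p rest ih =>
    obtain ⟨k, vs⟩ := p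
    have h1 : k ≠ v := by intro e; exact h (by simp [pvUniverse, e])
    have h2 : v ∉ pvUniverse rest := by
      intro hm; apply h; simp [pvUniverse] at hm ⊢; tauto
    have hbeq : (k == v) = false := beq_eq_false_iff_ne.mpr h1
    have hstep : pvLookup ((k, vs) :: rest) v = pvLookup rest v := by
      simp [pvLookup, PySem.Dict.getD_eq_get?_getD, PySem.Dict.get?_mk_cons, hbeq]
    rw [hstep]; exact ih h2

theorem pv_filter_le {α : Type} (l : List α) (p q : α → Bool)
    (h : ∀ x, q x = true → p x = true) : (l.filter q).length ≤ (l.filter p).length := by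
  induction l with
  | nil => simp
  | cons a t ih =>
    by_cases hq : q a = true
    · rw [List.filter_cons_of_pos hq, List.filter_cons_of_pos (h a hq)]
      simpa using ih
    · rw [List.filter_cons_of_neg (by simp [hq])]
      by_cases hp : p a = true
      · rw [List.filter_cons_of_pos hp]
        simp; omega
      · rw [List.filter_cons_of_neg (by simp [hp])]; exact ih

theorem pv_filter_lt {α : Type} (l : List α) (p q : α → Bool) (v : α)
    (hv : v ∈ l) (hp : p v = true) (hq : q v = false)
    (h : ∀ x, q x = true → p x = true) : (l.filter q).length < (l.filter p).length := by
  induction l with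
  | nil => simp at hv
  | cons a t ih =>
    rcases List.mem_cons.mp hv with rfl | hm
    · have hle := pv_filter_le t p q h
      rw [List.filter_cons_of_neg (by simp [hq]), List.filter_cons_of_pos hp]
      simp; omega
    · by_cases hqa : q a = true
      · rw [List.filter_cons_of_pos hqa, List.filter_cons_of_pos (h a hqa)]
        simpa using ih hm
      · rw [List.filter_cons_of_neg (by simp [hqa])]
        by_cases hpa : p a = true
        · rw [List.filter_cons_of_pos hpa]
          exact Nat.lt_succ_of_lt (ih hm)
        · rw [List.filter_cons_of_neg (by simp [hpa])]; exact ih hm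

theorem pvUnvis_add_lt (graph : List (String × List String)) (visited : PySem.Set String)
    (v : String) (hmem : v ∈ pvUniverse graph) (hc : PySem.Set.contains visited v = false) :
    pvUnvis graph (PySem.Set.add visited v) < pvUnvis graph visited := by
  have hadd : PySem.Set.add visited v = visited ++ [v] := by
    apply PySem.Set.add_of_not_mem
    simpa using (by simpa using hc : visited.contains v = false)
  unfold pvUnvis
  rw [hadd]
  apply pv_filter_lt _ _ _ v hmem
  · simpa using hc
  · simp
  · intro x hx
    simp at hx ⊢
    exact hx.1

theorem pvUnvis_add_eq (graph : List (String × List String)) (visited : PySem.Set String)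
    (v : String) (hmem : v ∉ pvUniverse graph) :
    pvUnvis graph (PySem.Set.add visited v) = pvUnvis graph visited := by
  unfold pvUnvis
  apply congrArg
  apply List.filter_congr
  intro x hx
  have hxv : x ≠ v := fun e => hmem (e ▸ hx)
  by_cases hcv : PySem.Set.contains visited v = true
  · rw [PySem.Set.add_of_mem (by simpa using hcv)]
  · rw [PySem.Set.add_of_not_mem (by simpa using (by simpa using hcv : visited.contains v = false))]
    simp [hxv]

-- literal port of A: the recursive dfs (the for-loop over neighbors is dfsAList);
-- the Nat argument is a fuel guard making the nested recursion total, never exhausted at pvFuel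
mutual
def dfsA (graph : List (String × List String)) : Nat → PySem.Set String → String → PySem.Set String
  | 0, visited, _ => visited
  | f + 1, visited, v =>
    if PySem.Set.contains visited v then visited
    else dfsAList graph f (PySem.Set.add visited v) (pvLookup graph v)
termination_by f _ _ => (f, 0)
def dfsAList (graph : List (String × List String)) : Nat → PySem.Set String → List String → PySem.Set String
  | _, visited, [] => visited
  | f, visited, n :: ns => dfsAList graph f (dfsA graph f visited n) ns
termination_by f _ l => (f, l.length + 1)
end

def pvFuel (graph : List (String × List String)) : Nat := (pvUniverse graph).length + 1

def solve (graph : List (String × List String)) (start : String) : List String :=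
  dfsA graph (pvFuel graph) PySem.Set.empty start

-- ===== PORT B =====
-- literal port of B: the while loop over the worklist (pop front, mark, prepend neighbors)
def solveLoop (graph : List (String × List String)) (visited : PySem.Set String)
    (stack : List String) : PySem.Set String :=
  match stack with
  | [] => visited
  | v :: rest =>
    if PySem.Set.contains visited v then solveLoop graph visited rest
    else solveLoop graph (PySem.Set.add visited v) (pvLookup graph v ++ rest)
termination_by (pvUnvis graph visited, stack.length)
decreasing_by
  · apply Prod.Lex.right; simp
  · rename_i hc
    by_cases hmem : v ∈ pvUniverse graph
    · exact Prod.Lex.left _ _ (pvUnvis_add_lt graph visited v hmem (by simpa using hc))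
    · rw [pvUnvis_add_eq graph visited v hmem, pvLookup_not_mem graph v hmem]
      apply Prod.Lex.right; simp

def solve_alt (graph : List (String × List String)) (start : String) : List String :=
  solveLoop graph PySem.Set.empty [start]

-- ===== PRECONDITION & SPEC =====
def Spec_solve (graph : List (String × List String)) (start : String) (out : List String) : Prop := out = solve_alt graph start
instance (graph : List (String × List String)) (start : String) (out : List String) : Decidable (Spec_solve graph start out) := by unfold Spec_solve; infer_instance

-- ===== CLAIM (what is proved, stated in full; the proofs are below) =====
def Claim_equal_solve : Prop := ∀ (graph : List (String × List String)) (start : String), Dom_solve graph start → Spec_solve graph start (solve graph start)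

-- ===== LEMMAS AND PROOFS =====

-- processing a concatenated worklist = processing the first part, then the second
theorem solveLoop_append (graph : List (String × List String)) (visited : PySem.Set String)
    (l1 l2 : List String) :
    solveLoop graph visited (l1 ++ l2) = solveLoop graph (solveLoop graph visited l1) l2 := by
  induction visited, l1 using solveLoop.induct graph with
  | case1 visited => simp [solveLoop]
  | case2 visited v rest hc ih =>
    rw [List.cons_append, solveLoop, if_pos hc, solveLoop, if_pos hc]
    exact ih
  | case3 visited v rest hc ih =>
    rw [List.cons_append, solveLoop, if_neg hc, solveLoop, if_neg hc, ← List.append_assoc]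
    exact ih

-- the loop only appends to visited
theorem solveLoop_sub (graph : List (String × List String)) (visited : PySem.Set String)
    (l : List String) : ∃ t, solveLoop graph visited l = visited ++ t := by
  induction visited, l using solveLoop.induct graph with
  | case1 visited => exact ⟨[], by simp [solveLoop]⟩
  | case2 visited v rest hc ih =>
    rw [solveLoop, if_pos hc]; exact ih
  | case3 visited v rest hc ih =>
    rw [solveLoop, if_neg hc]
    obtain ⟨t, ht⟩ := ih
    refine ⟨v :: t, ?_⟩
    rw [ht, PySem.Set.add_of_not_mem (by simpa using (by simpa using hc : visited.contains v = false))]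
    simp

theorem pvUnvis_append_le (graph : List (String × List String)) (visited t : List String) :
    pvUnvis graph (visited ++ t) ≤ pvUnvis graph visited := by
  apply pv_filter_le
  intro x hx
  simp at hx ⊢
  exact hx.1

-- MAIN: with enough fuel, A's nested recursion over a pending list equals B's worklist loop
theorem dfsAList_eq_solveLoop (graph : List (String × List String)) :
    ∀ f visited l, pvUnvis graph visited < f →
      dfsAList graph f visited l = solveLoop graph visited l := by
  intro f
  induction f using Nat.strong_induction_on with
  | _ f ihf =>
    intro visited l
    induction l generalizing visited with
    | nil => intro _; simp [dfsAList, solveLoop]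
    | cons v vs ihl =>
      intro h
      match f, h with
      | f' + 1, h =>
        by_cases hc : PySem.Set.contains visited v = true
        · rw [dfsAList, dfsA, if_pos hc, solveLoop, if_pos hc]
          exact ihl visited h
        · have hcf : PySem.Set.contains visited v = false := by simpa using hc
          rw [dfsAList, dfsA, if_neg hc, solveLoop, if_neg hc]
          have hstep : dfsAList graph f' (PySem.Set.add visited v) (pvLookup graph v)
              = solveLoop graph (PySem.Set.add visited v) (pvLookup graph v) := by
            by_cases hmem : v ∈ pvUniverse graph
            · exact ihf f' (by omega) _ _
                (by have := pvUnvis_add_lt graph visited v hmem hcf; omega)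
            · rw [pvLookup_not_mem graph v hmem]
              simp [dfsAList, solveLoop]
          rw [hstep]
          have happ := solveLoop_append graph (PySem.Set.add visited v) (pvLookup graph v) vs
          rw [happ]
          apply ihl
          obtain ⟨t, ht⟩ := solveLoop_sub graph (PySem.Set.add visited v) (pvLookup graph v)
          rw [ht]
          have hadd : PySem.Set.add visited v = visited ++ [v] :=
            PySem.Set.add_of_not_mem (by simpa using hcf)
          rw [hadd, List.append_assoc]
          have := pvUnvis_append_le graph visited ([v] ++ t)
          omega

theorem pvUnvis_empty (graph : List (String × List String)) :
    pvUnvis graph PySem.Set.empty = (pvUniverse graph).length := by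
  unfold pvUnvis
  simp [PySem.Set.empty]

-- ===== VERDICT (by name: the statement is the Claim_ definition above) =====
theorem solve_spec : Claim_equal_solve := by
  intro graph start _
  unfold Spec_solve solve solve_alt
  have h1 : dfsA graph (pvFuel graph) PySem.Set.empty start
      = dfsAList graph (pvFuel graph) PySem.Set.empty [start] := by
    rw [dfsAList, dfsAList]
  rw [h1]
  apply dfsAList_eq_solveLoop
  rw [pvUnvis_empty]
  unfold pvFuel
  omega
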